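-- pv_equiv track=rewrite | github.com/Brainfuckv2/Clingy8-python | c8vm.py | prettify_tape
-- ===== SOURCE A (Python) =====
-- import math
--
-- def prettify_tape(tape):
--     tape_size = len(tape)
--     sqrt_size = int(math.sqrt(tape_size))
--     formatted_list = []
--
--     for i, item in enumerate(tape):
--         formatted_list.append(str(item))
--         if (i + 1) % sqrt_size == 0:
--             formatted_list.append('\n')
--     return '\t' + '\t'.join(formatted_list)
-- ===== SOURCE B (Python) =====
-- import math
--
-- def prettify_tape(tape):
--     n = len(tape)
--     k = int(math.sqrt(n))
--     if k == 0:
--         return '\t'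
--     elements = []
--     for i in range(0, n, k):
--         row = tape[i:i + k]
--         elements.extend(str(x) for x in row)
--         if len(row) == k:
--             elements.append('\n')
--     return '\t' + '\t'.join(elements)
-- ===== Notes on version B (the rewrite author's own statement) =====
-- stated objective: alternative
-- what changed: B replaces A's single element-wise enumerate loop with a per-element modulo test by row-wise iteration: it slices the tape into rows of k=isqrt(n) elements with a stepped range, emits each row's strings in bulk and appends the newline marker only for full rows, then joins once.
import Mathlib
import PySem

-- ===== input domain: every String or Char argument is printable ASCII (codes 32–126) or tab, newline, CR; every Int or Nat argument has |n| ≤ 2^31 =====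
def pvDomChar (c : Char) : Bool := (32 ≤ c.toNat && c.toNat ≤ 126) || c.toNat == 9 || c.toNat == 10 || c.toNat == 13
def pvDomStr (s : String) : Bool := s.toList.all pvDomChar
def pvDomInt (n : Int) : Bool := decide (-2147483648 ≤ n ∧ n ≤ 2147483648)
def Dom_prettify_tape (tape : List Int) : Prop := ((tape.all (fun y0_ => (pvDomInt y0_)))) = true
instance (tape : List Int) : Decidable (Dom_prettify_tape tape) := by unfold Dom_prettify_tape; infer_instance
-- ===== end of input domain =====

-- B formats the tape row-by-row (stepped range + slices, newline only after full rows) instead of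
-- A's element-wise enumerate loop with a modulo test; same output, alternative decomposition.

-- ===== PORT A =====
-- int(math.sqrt(len(tape))) ported as Nat.sqrt: exact for every list length for which the float
-- sqrt is exact (all lengths below 2^52, i.e. every realizable list).
def prettify_tape (tape : List Int) : String :=
  let sqrt_size := Nat.sqrt tape.length
  let formatted_list := (PySem.List.enumerate tape 0).foldl
      (fun acc p =>
        let acc := acc ++ [PySem.Int.toStr p.2]
        if PySem.Int.mod (p.1 + 1) (sqrt_size : Int) == 0 then acc ++ ["\n"] else acc) []
  "\t" ++ PySem.Str.join "\t" formatted_list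

-- ===== PORT B =====
def prettify_tape_alt (tape : List Int) : String :=
  let n := tape.length
  let k := Nat.sqrt n
  if k = 0 then "\t"
  else
    let elements := (PySem.List.pyRange 0 (n : Int) (k : Int)).foldl
        (fun acc i =>
          let row := PySem.List.slice tape (some i) (some (i + (k : Int)))
          let acc := acc ++ row.map PySem.Int.toStr
          if row.length == k then acc ++ ["\n"] else acc) []
    "\t" ++ PySem.Str.join "\t" elements

-- ===== PRECONDITION & SPEC =====
def Spec_prettify_tape (tape : List Int) (out : String) : Prop := out = prettify_tape_alt tape
instance (tape : List Int) (out : String) : Decidable (Spec_prettify_tape tape out) := by unfold Spec_prettify_tape; infer_instance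

-- ===== CLAIM (what is proved, stated in full; the proofs are below) =====
def Claim_equal_prettify_tape : Prop := ∀ (tape : List Int), Dom_prettify_tape tape → Spec_prettify_tape tape (prettify_tape tape)

-- ===== LEMMAS AND PROOFS =====

-- the per-element emission of A's loop
def gA (k : Nat) (p : Int × Int) : List String :=
  [PySem.Int.toStr p.2] ++ (if PySem.Int.mod (p.1 + 1) (k : Int) == 0 then ["\n"] else [])

-- the per-row emission of B's loop
def gB (tape : List Int) (k : Nat) (i : Int) : List String :=
  (PySem.List.slice tape (some i) (some (i + (k : Int)))).map PySem.Int.toStr ++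
    (if (PySem.List.slice tape (some i) (some (i + (k : Int)))).length == k then ["\n"] else [])

-- common row-chunked description of the emitted list
def rowsSpec (k : Nat) (tape : List Int) : List String :=
  if _h : k = 0 ∨ tape.length < k then tape.map PySem.Int.toStr
  else (tape.take k).map PySem.Int.toStr ++ ["\n"] ++ rowsSpec k (tape.drop k)
termination_by tape.length
decreasing_by
  push Not at _h
  simp only [List.length_drop]
  omega

theorem mod_cast_small (k s j : Nat) (h : j + 1 < k) :
    PySem.Int.mod ((((s * k + j : Nat) : Int)) + 1) (k : Int) = ((j + 1 : Nat) : Int) := by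
  have hk : (0 : Int) ≤ (k : Int) := by positivity
  unfold PySem.Int.mod
  rw [Int.fmod_eq_emod]
  have : (((s * k + j : Nat) : Int)) + 1 = ((j + 1 : Nat) : Int) + (k : Int) * (s : Int) := by
    push_cast; ring
  rw [this, Int.add_mul_emod_self_left, Int.emod_eq_of_lt (by positivity) (by exact_mod_cast h)]
  simp [hk]

theorem mod_cast_full (k s : Nat) (hk : 1 ≤ k) :
    PySem.Int.mod ((((s * k + (k - 1) : Nat) : Int)) + 1) (k : Int) = 0 := by
  have hk0 : (0 : Int) ≤ (k : Int) := by positivity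
  unfold PySem.Int.mod
  rw [Int.fmod_eq_emod]
  have : (((s * k + (k - 1) : Nat) : Int)) + 1 = (k : Int) * ((s : Int) + 1) := by
    push_cast [Nat.cast_sub hk]; ring
  rw [this, Int.mul_emod_right]
  simp [hk0]

theorem enum_singleton (y : Int) (t : Int) :
    PySem.List.enumerate [y] t = [(t, y)] := by
  simp [PySem.List.enumerate]

theorem noNL (k : Nat) : ∀ (tape : List Int) (s j : Nat), j + tape.length < k →
    (PySem.List.enumerate tape ((s * k + j : Nat) : Int)).flatMap (gA k) =
      tape.map PySem.Int.toStr := by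
  intro tape
  induction tape with
  | nil => intro s j _; simp [PySem.List.enumerate]
  | cons x xs ih =>
    intro s j hlt
    rw [PySem.List.enumerate_cons]
    have hm : PySem.Int.mod ((((s * k + j : Nat) : Int)) + 1) (k : Int) = ((j + 1 : Nat) : Int) :=
      mod_cast_small k s j (by simp at hlt; omega)
    have hne : ¬ (PySem.Int.mod ((((s * k + j : Nat) : Int)) + 1) (k : Int) == 0) = true := by
      rw [hm]; simp; omega
    have hstep : (((s * k + j : Nat) : Int)) + 1 = ((s * k + (j + 1) : Nat) : Int) := by push_cast; ring
    simp only [List.flatMap_cons, gA, hne]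
    rw [hstep, ih s (j + 1) (by simp at hlt ⊢; omega)]
    simp

theorem rowNL_aux (k : Nat) (hk : 1 ≤ k) (ys : List Int) (y : Int)
    (hlen : ys.length + 1 = k) (s : Nat) :
    (PySem.List.enumerate (ys ++ [y]) ((s * k : Nat) : Int)).flatMap (gA k) =
      (ys ++ [y]).map PySem.Int.toStr ++ ["\n"] := by
  rw [PySem.List.enumerate_append, List.flatMap_append]
  have h1 : (PySem.List.enumerate ys ((s * k : Nat) : Int)).flatMap (gA k) =
      ys.map PySem.Int.toStr := by
    have := noNL k ys s 0 (by omega)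
    simpa using this
  have hidx : ((s * k : Nat) : Int) + (ys.length : Int) = ((s * k + (k - 1) : Nat) : Int) := by
    push_cast [Nat.cast_sub hk]; omega
  have h2 : (PySem.List.enumerate [y] (((s * k : Nat) : Int) + (ys.length : Int))).flatMap (gA k) =
      [PySem.Int.toStr y, "\n"] := by
    rw [hidx, enum_singleton]
    simp only [List.flatMap_cons, List.flatMap_nil, List.append_nil, gA]
    rw [mod_cast_full k s hk]
    simp
  rw [h1, h2]
  simp

theorem pyRange_pos_eq_nil (a b k : Int) (hk : 0 < k) (hba : b ≤ a) :
    PySem.List.pyRange a b k = [] := by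
  rw [PySem.List.pyRange_of_pos _ _ hk, if_neg (by omega)]
  simp

theorem pyRange_pos_cons (a b k : Int) (hk : 0 < k) (hab : a < b) :
    PySem.List.pyRange a b k = a :: PySem.List.pyRange (a + k) b k := by
  rw [PySem.List.pyRange_of_pos _ _ hk, PySem.List.pyRange_of_pos _ _ hk, if_pos hab]
  by_cases h2 : a + k < b
  · rw [if_pos h2]
    have hd : (b - a + k - 1) / k = (b - (a + k) + k - 1) / k + 1 := by
      have hnum : b - a + k - 1 = (b - (a + k) + k - 1) + 1 * k := by ring
      rw [hnum, Int.add_mul_ediv_right _ _ (by omega)]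
    have hnn : 0 ≤ (b - (a + k) + k - 1) / k := Int.ediv_nonneg (by omega) (by omega)
    rw [hd, show ((b - (a + k) + k - 1) / k + 1).toNat = ((b - (a + k) + k - 1) / k).toNat + 1 by omega,
      List.range_succ_eq_map]
    simp only [List.map_cons, List.map_map, Nat.cast_zero, mul_zero, add_zero]
    refine congrArg₂ _ rfl (List.map_congr_left fun j _ => ?_)
    simp only [Function.comp_apply]
    push_cast; ring
  · rw [if_neg h2]
    have h1 : (b - a + k - 1) / k = 1 := by
      have hge : 1 ≤ (b - a + k - 1) / k := Int.le_ediv_iff_mul_le hk |>.mpr (by omega)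
      have hlt2 : (b - a + k - 1) / k < 2 := Int.ediv_lt_iff_lt_mul hk |>.mpr (by omega)
      omega
    rw [h1]
    simp

theorem lemA (k : Nat) (hk : 1 ≤ k) : ∀ (fuel : Nat) (tape : List Int), tape.length ≤ fuel →
    ∀ s : Nat, (PySem.List.enumerate tape ((s * k : Nat) : Int)).flatMap (gA k) =
      rowsSpec k tape := by
  intro fuel
  induction fuel with
  | zero =>
    intro tape h s
    have : tape = [] := List.eq_nil_of_length_eq_zero (by omega)
    subst this
    rw [rowsSpec]
    simp [PySem.List.enumerate]
  | succ f ih =>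
    intro tape h s
    by_cases hshort : tape.length < k
    · rw [rowsSpec, dif_pos (Or.inr hshort)]
      have := noNL k tape s 0 (by omega)
      simpa using this
    · conv_lhs => rw [← List.take_append_drop k tape]
      rw [PySem.List.enumerate_append, List.flatMap_append]
      have hlen : (tape.take k).length = k := by simp; omega
      have hne : tape.take k ≠ [] := by
        intro hnil; rw [hnil] at hlen; simp at hlen; omega
      have hrow := rowNL_aux k hk (tape.take k).dropLast ((tape.take k).getLast hne)
        (by simp only [List.length_dropLast, hlen]; omega) s
      rw [List.dropLast_append_getLast hne] at hrow
      rw [hrow]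
      have hcast : ((s * k : Nat) : Int) + ((tape.take k).length : Int) = (((s + 1) * k : Nat) : Int) := by
        rw [hlen]; push_cast; ring
      rw [hcast, ih (tape.drop k) (by simp; omega) (s + 1)]
      conv_rhs => rw [rowsSpec]
      rw [dif_neg (by omega)]

theorem lemB (k : Nat) (hk : 1 ≤ k) : ∀ (fuel : Nat) (tape : List Int) (off : Nat),
    tape.length - off ≤ fuel →
    (PySem.List.pyRange ((off : Nat) : Int) ((tape.length : Nat) : Int) (k : Int)).flatMap (gB tape k) =
      rowsSpec k (tape.drop off) := by
  intro fuel
  induction fuel with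
  | zero =>
    intro tape off h
    have hle : tape.length ≤ off := by omega
    rw [pyRange_pos_eq_nil _ _ _ (by exact_mod_cast hk) (by exact_mod_cast hle),
        List.drop_eq_nil_of_le hle, rowsSpec]
    simp
  | succ f ih =>
    intro tape off h
    by_cases hoff : tape.length ≤ off
    · rw [pyRange_pos_eq_nil _ _ _ (by exact_mod_cast hk) (by exact_mod_cast hoff),
          List.drop_eq_nil_of_le hoff, rowsSpec]
      simp
    · rw [pyRange_pos_cons _ _ _ (by exact_mod_cast hk)
          (by exact_mod_cast (show off < tape.length by omega)), List.flatMap_cons]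
      have hslice : PySem.List.slice tape (some (off : Int)) (some ((off : Int) + (k : Int))) =
          (tape.drop off).take k := by
        rw [show (off : Int) + (k : Int) = ((off + k : Nat) : Int) by push_cast; ring,
            PySem.List.slice_natCast]
        congr 1
        omega
      have hcast : (off : Int) + (k : Int) = ((off + k : Nat) : Int) := by push_cast; ring
      by_cases hfull : k ≤ tape.length - off
      · have hlk : (((tape.drop off).take k).length == k) = true := by simp; omega
        have hgB : gB tape k ((off : Nat) : Int) =
            ((tape.drop off).take k).map PySem.Int.toStr ++ ["\n"] := by
          unfold gB
          rw [hslice, hlk]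
          simp
        rw [hgB, hcast, ih tape (off + k) (by omega)]
        conv_rhs => rw [rowsSpec]
        rw [dif_neg (by simp only [List.length_drop]; omega)]
        simp [List.drop_drop, Nat.add_comm, List.append_assoc]
      · have htake : (tape.drop off).take k = tape.drop off :=
          List.take_of_length_le (by simp; omega)
        have hlk : ((tape.drop off).length == k) = false := by simp; omega
        have hgB : gB tape k ((off : Nat) : Int) =
            (tape.drop off).map PySem.Int.toStr := by
          unfold gB
          rw [hslice, htake, hlk]
          simp
        rw [hgB, hcast, pyRange_pos_eq_nil _ _ _ (by exact_mod_cast hk) (by push_cast; omega)]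
        conv_rhs => rw [rowsSpec]
        rw [dif_pos (Or.inr (by simp only [List.length_drop]; omega))]
        simp

theorem foldl_emitA (k : Nat) (l : List (Int × Int)) :
    l.foldl (fun acc p =>
        let acc := acc ++ [PySem.Int.toStr p.2]
        if PySem.Int.mod (p.1 + 1) (k : Int) == 0 then acc ++ ["\n"] else acc) [] =
      l.flatMap (gA k) := by
  have hfun : (fun (acc : List String) (p : Int × Int) =>
      let acc := acc ++ [PySem.Int.toStr p.2]
      if PySem.Int.mod (p.1 + 1) (k : Int) == 0 then acc ++ ["\n"] else acc) =
      fun acc p => acc ++ gA k p := by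
    funext acc p
    unfold gA
    split <;> simp
  rw [hfun, PySem.List.foldl_append_eq_flatMap]
  simp

theorem foldl_emitB (tape : List Int) (k : Nat) (l : List Int) :
    l.foldl (fun acc i =>
        let row := PySem.List.slice tape (some i) (some (i + (k : Int)))
        let acc := acc ++ row.map PySem.Int.toStr
        if row.length == k then acc ++ ["\n"] else acc) [] =
      l.flatMap (gB tape k) := by
  have hfun : (fun (acc : List String) (i : Int) =>
      let row := PySem.List.slice tape (some i) (some (i + (k : Int)))
      let acc := acc ++ row.map PySem.Int.toStr
      if row.length == k then acc ++ ["\n"] else acc) =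
      fun acc i => acc ++ gB tape k i := by
    funext acc i
    unfold gB
    split <;> simp_all
  rw [hfun, PySem.List.foldl_append_eq_flatMap]
  simp

-- ===== VERDICT (by name: the statement is the Claim_ definition above) =====
theorem prettify_tape_spec : Claim_equal_prettify_tape := by
  intro tape _
  unfold Spec_prettify_tape
  by_cases h0 : tape.length = 0
  · have : tape = [] := List.eq_nil_of_length_eq_zero h0
    subst this
    decide
  · have hk : 1 ≤ Nat.sqrt tape.length := Nat.sqrt_pos.mpr (by omega)
    simp only [prettify_tape, prettify_tape_alt, foldl_emitA, foldl_emitB]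
    rw [if_neg (by omega)]
    have hA := lemA (Nat.sqrt tape.length) hk tape.length tape le_rfl 0
    have hB := lemB (Nat.sqrt tape.length) hk tape.length tape 0 (by omega)
    simp only [Nat.zero_mul, Nat.cast_zero, List.drop_zero] at hA hB
    rw [hA, hB]
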